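-- pv_equiv track=rewrite | github.com/PashaSh0k/cmc_sem5 | ML/task1/task7.py | find_shortest
-- ===== SOURCE A (Python) =====
-- def find_shortest(l):
--     k = ""
--     for i in l:
--         if i.isalpha():
--             k += i
--         else:
--             k += ' '
--     k = k.split()
--     return len(min(k, key=len)) if k else 0
-- ===== SOURCE B (Python) =====
-- def find_shortest(l):
--     best = None
--     cur = 0
--     for ch in l:
--         if ch.isalpha():
--             cur += 1
--         elif cur:
--             best = cur if best is None else min(best, cur)
--             cur = 0
--     if cur:
--         best = cur if best is None else min(best, cur)
--     return best if best is not None else 0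
-- ===== Notes on version B (the rewrite author's own statement) =====
-- stated objective: faster
-- what changed: Single pass keeping only the current alphabetic run length and the running minimum, instead of building a masked copy of the string, splitting it into a word list and calling min over it.
import Mathlib
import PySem

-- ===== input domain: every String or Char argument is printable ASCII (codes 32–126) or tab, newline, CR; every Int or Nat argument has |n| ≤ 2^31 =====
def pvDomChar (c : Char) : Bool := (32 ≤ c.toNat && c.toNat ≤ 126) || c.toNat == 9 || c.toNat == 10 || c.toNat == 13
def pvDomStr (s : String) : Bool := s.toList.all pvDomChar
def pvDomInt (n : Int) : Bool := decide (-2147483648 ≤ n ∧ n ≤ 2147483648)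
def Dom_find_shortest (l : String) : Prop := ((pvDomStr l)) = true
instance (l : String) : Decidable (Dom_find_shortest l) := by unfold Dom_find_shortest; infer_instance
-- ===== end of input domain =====

-- B replaces A's mask-split-min pipeline by a single pass keeping only the current run
-- length and the running minimum (no intermediate string or word list is built).

-- ===== PORT A =====
-- strings are ported as List Char (PySem.Chars is the exact model of Python's str ops)
def find_shortest (l : String) : Int :=
  let k : List Char :=
    l.toList.foldl (fun k i => if PySem.Chars.isalpha i then k ++ [i] else k ++ [' ']) []
  let ks := PySem.Chars.split₀ k
  match PySem.List.min? ks (fun w => PySem.Chars.len w) with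
  | some m => PySem.Chars.len m
  | none => 0

-- ===== PORT B =====
-- one step of B's loop: state = (length of current alphabetic run, best completed run so far)
def fsStep (s : Int × Option Int) (c : Char) : Int × Option Int :=
  if PySem.Chars.isalpha c then (s.1 + 1, s.2)
  else if s.1 ≠ 0 then
    (0, some (match s.2 with | none => s.1 | some b => min b s.1))
  else s

def find_shortest_alt (l : String) : Int :=
  let s := l.toList.foldl fsStep (0, none)
  let best : Option Int :=
    if s.1 ≠ 0 then some (match s.2 with | none => s.1 | some b => min b s.1) else s.2
  best.getD 0

-- ===== PRECONDITION & SPEC =====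
def Spec_find_shortest (l : String) (out : Int) : Prop := out = find_shortest_alt l
instance (l : String) (out : Int) : Decidable (Spec_find_shortest l out) := by unfold Spec_find_shortest; infer_instance

-- ===== CLAIM (what is proved, stated in full; the proofs are below) =====
def Claim_equal_find_shortest : Prop := ∀ (l : String), Dom_find_shortest l → Spec_find_shortest l (find_shortest l)

-- ===== LEMMAS AND PROOFS =====

-- A's first loop masks every non-alphabetic character to ' '
def fsMask (c : Char) : Char := if PySem.Chars.isalpha c then c else ' '

-- length-accumulating step used to compare min-by-len with B's running minimum
def fsLstep (o : Option Int) (w : List Char) : Option Int :=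
  some (match o with | none => PySem.Chars.len w | some x => min x (PySem.Chars.len w))

-- B's loop closing step
def fsClose (s : Int × Option Int) : Option Int :=
  if s.1 ≠ 0 then some (match s.2 with | none => s.1 | some b => min b s.1) else s.2

theorem fs_build_eq_map (cs : List Char) (acc : List Char) :
    cs.foldl (fun k i => if PySem.Chars.isalpha i then k ++ [i] else k ++ [' ']) acc
      = acc ++ cs.map fsMask := by
  induction cs generalizing acc with
  | nil => simp
  | cons c cs ih =>
    simp only [List.foldl_cons, List.map_cons, fsMask]
    split_ifs <;> simp [ih]

theorem fs_alpha_not_space (c : Char) (h : PySem.Chars.isalpha c = true) :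
    PySem.Chars.isspace c = false := by
  have hv : (65 ≤ c.toNat ∧ c.toNat ≤ 90) ∨ (97 ≤ c.toNat ∧ c.toNat ≤ 122) := by
    simp only [PySem.Chars.isalpha, PySem.Chars.isupper, PySem.Chars.islower, Bool.or_eq_true,
      Bool.and_eq_true, decide_eq_true_eq, Char.le_def, UInt32.le_iff_toNat_le] at h
    exact h
  simp only [PySem.Chars.isspace]
  simp only [Bool.or_eq_false_iff, Bool.and_eq_false_iff, decide_eq_false_iff_not]
  omega

theorem fs_go_acc (s : List Char) (cur : List Char) (acc : List (List Char)) :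
    PySem.Chars.split₀.go s cur acc = acc.reverse ++ PySem.Chars.split₀.go s cur [] := by
  induction s generalizing cur acc with
  | nil =>
    simp only [PySem.Chars.split₀.go]
    split_ifs <;> simp
  | cons c rest ih =>
    simp only [PySem.Chars.split₀.go]
    split_ifs with h1 h2
    · exact ih [] acc
    · rw [ih [] (cur.reverse :: acc), ih [] [cur.reverse]]
      simp
    · exact ih (c :: cur) acc

theorem fs_min_len_eq_fold (ks : List (List Char)) (b : Option (List Char)) :
    (ks.foldl (fun acc x =>
        match acc with
        | none => some x
        | some m => if PySem.Chars.len x < PySem.Chars.len m then some x else some m) b).map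
        PySem.Chars.len
      = ks.foldl fsLstep (b.map PySem.Chars.len) := by
  induction ks generalizing b with
  | nil => rfl
  | cons w ks ih =>
    rw [List.foldl_cons, List.foldl_cons, ih]
    congr 1
    cases b with
    | none => rfl
    | some m =>
      simp only [Option.map_some, fsLstep, PySem.Chars.len]
      split_ifs with h
      · simp [min_def, PySem.Chars.len] at h ⊢
        omega
      · simp [min_def, PySem.Chars.len] at h ⊢
        omega

theorem fs_min_final (ks : List (List Char)) :
    (match PySem.List.min? ks (fun w => PySem.Chars.len w) with
      | some m => PySem.Chars.len m
      | none => 0)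
      = (ks.foldl fsLstep none).getD 0 := by
  have h := fs_min_len_eq_fold ks none
  have e : PySem.List.min? ks (fun w => PySem.Chars.len w)
      = ks.foldl (fun acc x =>
          match acc with
          | none => some x
          | some m => if PySem.Chars.len x < PySem.Chars.len m then some x else some m) none := by
    unfold PySem.List.min?
    congr 1
    funext acc x
    cases acc <;> rfl
  rw [e]
  cases hk : ks.foldl (fun acc x =>
      match acc with
      | none => some x
      | some m => if PySem.Chars.len x < PySem.Chars.len m then some x else some m) none with
  | none =>
    rw [hk, Option.map_none] at h
    simp [← h]
  | some m =>
    rw [hk, Option.map_some, Option.map_none] at h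
    rw [← h]
    simp [PySem.Chars.len]

theorem fs_main (cs : List Char) (cur : List Char) (b : Option Int) :
    (PySem.Chars.split₀.go (cs.map fsMask) cur []).foldl fsLstep b
      = fsClose (cs.foldl fsStep ((cur.length : Int), b)) := by
  induction cs generalizing cur b with
  | nil =>
    simp only [List.map_nil, PySem.Chars.split₀.go, List.foldl_nil, fsClose]
    by_cases h : cur = []
    · simp [h]
    · have hne : cur.isEmpty = false := by simp [h]
      have hlen : (cur.length : Int) ≠ 0 := by
        simp only [ne_eq, Int.natCast_eq_zero, List.length_eq_zero_iff]; exact h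
      simp only [hne, Bool.false_eq_true, if_false, if_pos hlen]
      simp [fsLstep, PySem.Chars.len]
  | cons c cs ih =>
    by_cases ha : PySem.Chars.isalpha c = true
    · have hm : fsMask c = c := by simp [fsMask, ha]
      have hs : PySem.Chars.isspace c = false := fs_alpha_not_space c ha
      simp only [List.map_cons, hm, PySem.Chars.split₀.go, hs, Bool.false_eq_true, if_false,
        List.foldl_cons, fsStep, ha, if_pos]
      have := ih (c :: cur) b
      simpa [add_comm] using this
    · have hm : fsMask c = ' ' := by simp [fsMask, ha]
      have hs : PySem.Chars.isspace ' ' = true := by decide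
      simp only [List.map_cons, hm, PySem.Chars.split₀.go, hs, if_pos, List.foldl_cons,
        fsStep, ha, Bool.false_eq_true, if_false]
      by_cases h : cur = []
      · subst h
        simpa using ih [] b
      · have hne : cur.isEmpty = false := by simp [h]
        have hlen : (cur.length : Int) ≠ 0 := by
          simp only [ne_eq, Int.natCast_eq_zero, List.length_eq_zero_iff]; exact h
        simp only [hne, Bool.false_eq_true, if_false, if_pos hlen]
        rw [fs_go_acc _ [] [cur.reverse]]
        simp only [List.reverse_cons, List.reverse_nil, List.nil_append, List.singleton_append,
          List.foldl_cons]
        have := ih [] (fsLstep b cur.reverse)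
        simp only [List.length_nil, Nat.cast_zero] at this
        rw [this]
        congr 2
        simp [fsLstep, PySem.Chars.len]

-- ===== VERDICT (by name: the statement is the Claim_ definition above) =====
theorem find_shortest_spec : Claim_equal_find_shortest := by
  intro l _
  show find_shortest l = find_shortest_alt l
  show (match PySem.List.min? (PySem.Chars.split₀
          (l.toList.foldl (fun k i => if PySem.Chars.isalpha i then k ++ [i] else k ++ [' ']) []))
          (fun w => PySem.Chars.len w) with
      | some m => PySem.Chars.len m
      | none => 0)
    = (fsClose (l.toList.foldl fsStep (0, none))).getD 0
  rw [fs_min_final]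
  rw [fs_build_eq_map l.toList []]
  simp only [List.nil_append, PySem.Chars.split₀]
  have hmain := fs_main l.toList [] none
  simp only [List.length_nil, Nat.cast_zero] at hmain
  rw [hmain]
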